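-- pv_equiv track=rewrite | github.com/lychristy/Algorithm | Binary Search/2. Binary Search II/Find Local Minimum.py | localMinimum
-- ===== SOURCE A (Python) =====
-- def localMinimum(array):
--   """
--   input: int[] array
--   return: int
--   """
--   # write your solution here
--   if len(array) is 1:
--     return 0
--
--   left = 0
--   right = len(array) - 1
--
--   while left <= right:
--     mid = left + (right - left) // 2
--
--     prev = array[mid] + 1 if mid == 0 else array[mid - 1]
--     next = array[mid] + 1 if mid == len(array) - 1 else array[mid + 1]
--
--     if array[mid] < prev and array[mid] < next:
--       return mid
--     elif prev < array[mid]: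
--       right = mid - 1
--     else:
--       left = mid + 1
--
--   return -1
-- ===== SOURCE B (Python) =====
-- def localMinimum(array):
--   """
--   input: int[] array
--   return: int
--   """
--   def nbr(i, cur):
--     # neighbour value, with cur+1 standing in for a missing neighbour
--     return array[i] if 0 <= i < len(array) else cur + 1
--
--   def search(left, right):
--     if left > right:
--       return -1
--     mid = (left + right) // 2
--     cur = array[mid]
--     p = nbr(mid - 1, cur)
--     n = nbr(mid + 1, cur)
--     if p < cur:
--       return search(left, mid - 1)
--     if cur < p and cur < n:
--       return mid
--     return search(mid + 1, right)
--
--   return search(0, len(array) - 1)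
-- ===== Notes on version B (the rewrite author's own statement) =====
-- stated objective: alternative
-- what changed: The iterative while-loop with mid==0/mid==len-1 sentinel tests is replaced by a recursive search(left,right) with base case left>right, a bounds-checked neighbour helper instead of index-equality sentinels, reordered branches (go-left test first), midpoint (left+right)//2, and the redundant len==1 short-circuit removed.
import Mathlib
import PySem

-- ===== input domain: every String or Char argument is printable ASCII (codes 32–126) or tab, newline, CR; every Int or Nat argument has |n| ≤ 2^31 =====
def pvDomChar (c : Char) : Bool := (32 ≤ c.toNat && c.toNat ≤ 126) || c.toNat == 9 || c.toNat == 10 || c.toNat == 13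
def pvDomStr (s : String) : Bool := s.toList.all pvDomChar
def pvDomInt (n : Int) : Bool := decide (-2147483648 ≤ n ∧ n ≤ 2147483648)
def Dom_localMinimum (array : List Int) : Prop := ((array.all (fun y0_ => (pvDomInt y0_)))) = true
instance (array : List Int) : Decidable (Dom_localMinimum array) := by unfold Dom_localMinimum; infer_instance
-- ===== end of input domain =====

-- B: recursive binary search with a bounds-checked neighbour helper and reordered branches,
-- replacing A's while loop with index-equality sentinels; same asymptotic cost (alternative).
-- Both loops are ported with a fuel parameter (array.length + 1 strictly bounds the number of
-- iterations, since the interval shrinks each step), and array[i] as pyGetD array i 0: every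
-- index either loop reads is in range.

-- ===== PORT A =====
-- the while loop of A, as fuel-based recursion on the shrinking interval [left, right]
def lmLoop (array : List Int) : Nat → Int → Int → Int
  | 0, _, _ => -1
  | fuel + 1, left, right =>
    if left ≤ right then
      let mid := left + PySem.Int.floordiv (right - left) 2
      let amid := PySem.List.pyGetD array mid 0
      let prev := if mid = 0 then amid + 1 else PySem.List.pyGetD array (mid - 1) 0
      let next := if mid = (array.length : Int) - 1 then amid + 1 else PySem.List.pyGetD array (mid + 1) 0
      if amid < prev ∧ amid < next then mid
      else if prev < amid then lmLoop array fuel left (mid - 1)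
      else lmLoop array fuel (mid + 1) right
    else -1

def localMinimum (array : List Int) : Int :=
  if (array.length : Int) = 1 then 0
  else lmLoop array (array.length + 1) 0 ((array.length : Int) - 1)

-- ===== PORT B =====
-- neighbour value, with cur+1 standing in for a missing neighbour
def lmNbr (array : List Int) (i cur : Int) : Int :=
  if 0 ≤ i ∧ i < (array.length : Int) then PySem.List.pyGetD array i 0 else cur + 1

def lmSearch (array : List Int) : Nat → Int → Int → Int
  | 0, _, _ => -1
  | fuel + 1, left, right =>
    if left > right then -1
    else
      let mid := PySem.Int.floordiv (left + right) 2
      let cur := PySem.List.pyGetD array mid 0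
      let p := lmNbr array (mid - 1) cur
      let n := lmNbr array (mid + 1) cur
      if p < cur then lmSearch array fuel left (mid - 1)
      else if cur < p ∧ cur < n then mid
      else lmSearch array fuel (mid + 1) right

def localMinimum_alt (array : List Int) : Int :=
  lmSearch array (array.length + 1) 0 ((array.length : Int) - 1)

-- ===== PRECONDITION & SPEC =====
def Spec_localMinimum (array : List Int) (out : Int) : Prop := out = localMinimum_alt array
instance (array : List Int) (out : Int) : Decidable (Spec_localMinimum array out) := by unfold Spec_localMinimum; infer_instance

-- ===== CLAIM (what is proved, stated in full; the proofs are below) =====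
def Claim_equal_localMinimum : Prop := ∀ (array : List Int), Dom_localMinimum array → Spec_localMinimum array (localMinimum array)

-- ===== LEMMAS AND PROOFS =====

-- the two recursions agree on every interval inside the array bounds, for equal fuel
theorem lmLoop_eq_lmSearch (array : List Int) (fuel : Nat) (left right : Int)
    (hl : 0 ≤ left) (hr : right ≤ (array.length : Int) - 1) :
    lmLoop array fuel left right = lmSearch array fuel left right := by
  induction fuel generalizing left right with
  | zero => rfl
  | succ fuel ih =>
    simp only [lmLoop, lmSearch]
    by_cases h : left ≤ right
    · have h2 : (0:Int) < 2 := by omega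
      have hmid : left + PySem.Int.floordiv (right - left) 2 = PySem.Int.floordiv (left + right) 2 := by
        simp only [PySem.Int.floordiv_eq_ediv_of_pos h2]
        omega
      rw [if_pos h, if_neg (by omega : ¬ left > right), hmid]
      set mid := PySem.Int.floordiv (left + right) 2 with hmiddef
      have hb := PySem.Int.floordiv_two_mid_bounds h
      rw [← hmiddef] at hb
      have hm0 : 0 ≤ mid := by omega
      have hm1 : mid ≤ (array.length : Int) - 1 := by omega
      have hprev : (if mid = 0 then PySem.List.pyGetD array mid 0 + 1
          else PySem.List.pyGetD array (mid - 1) 0) = lmNbr array (mid - 1) (PySem.List.pyGetD array mid 0) := by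
        unfold lmNbr
        by_cases hz : mid = 0
        · simp [hz]
        · rw [if_neg hz, if_pos (by omega : (0:Int) ≤ mid - 1 ∧ mid - 1 < (array.length : Int))]
      have hnext : (if mid = (array.length : Int) - 1 then PySem.List.pyGetD array mid 0 + 1
          else PySem.List.pyGetD array (mid + 1) 0) = lmNbr array (mid + 1) (PySem.List.pyGetD array mid 0) := by
        unfold lmNbr
        by_cases hz : mid = (array.length : Int) - 1
        · rw [if_pos hz, if_neg (by omega)]
        · rw [if_neg hz, if_pos (by omega)]
      rw [hprev, hnext]
      set cur := PySem.List.pyGetD array mid 0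
      set p := lmNbr array (mid - 1) cur
      set n := lmNbr array (mid + 1) cur
      by_cases hpl : p < cur
      · rw [if_neg (by omega : ¬ (cur < p ∧ cur < n)), if_pos hpl, if_pos hpl]
        exact ih left (mid - 1) hl (by omega)
      · by_cases hret : cur < p ∧ cur < n
        · rw [if_pos hret, if_neg hpl, if_pos hret]
        · simp only [if_neg hret, if_neg hpl]
          exact ih (mid + 1) right (by omega) hr
    · rw [if_neg h, if_pos (by omega : left > right)]

-- A's len == 1 short-circuit agrees with the search itself
theorem lmSearch_singleton (array : List Int) (h : (array.length : Int) = 1) :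
    lmSearch array (array.length + 1) 0 ((array.length : Int) - 1) = 0 := by
  have hl : array.length = 1 := by exact_mod_cast h
  have hm : PySem.Int.floordiv (0 + ((1:Int) - 1)) 2 = 0 := by decide
  rw [hl]
  simp only [lmSearch, lmNbr, Nat.cast_one, hm, hl]
  norm_num

-- ===== VERDICT (by name: the statement is the Claim_ definition above) =====
theorem localMinimum_spec : Claim_equal_localMinimum := by
  intro array _
  unfold Spec_localMinimum localMinimum localMinimum_alt
  by_cases h1 : (array.length : Int) = 1
  · rw [if_pos h1, lmSearch_singleton array h1]
  · rw [if_neg h1, lmLoop_eq_lmSearch array _ 0 _ (le_refl 0) (le_refl _)]
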